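-- pv_equiv track=rewrite | github.com/RickyL-2000/python-learning | calc_and_draft/ece428_hw6_q4.py | search
-- ===== SOURCE A (Python) =====
-- m = 32
--
-- def successor(key, nodes):
--     key = key % (2**m)
--     for node in nodes:
--         if node >= key:
--             return node
--     return nodes[0]
--
-- def next(node, nodes):
--     idx = nodes.index(node)
--     return nodes[(idx+1) % len(nodes)]
--
-- def prev(node, nodes):
--     idx = nodes.index(node)
--     return nodes[(idx-1+len(nodes)) % len(nodes)]
--
-- def find_fingers(node, nodes):
--     fingers = []
--     for i in range(m):
--         fingers.append(successor(node + 2**i, nodes))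
--     return fingers
--
-- def search(node, key, nodes):
--     fingers = find_fingers(node, nodes)
--     visited = []
--     for n in fingers:
--         visited.append(n)
--         if n < key <= next(n, nodes):
--             return next(n, nodes), visited
--         elif prev(n, nodes) < key <= n:
--             return n, visited
--     idx = 0
--     fingers.sort()
--     while fingers[idx] < key:
--         idx += 1
--     return fingers[(idx-1+len(fingers))%len(fingers)], visited
-- ===== SOURCE B (Python) =====
-- M = 32
--
-- def search(node, key, nodes):
--     L = len(nodes)
--     mod = 1 << M
--     # all 32 finger targets, then answer all "first element >= q" queries in ONE pass over nodes
--     queries = [(node + (1 << i)) % mod for i in range(M)]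
--     pending = sorted(set(queries))      # ascending, distinct
--     ans = {}
--     best = None                          # running maximum of the scanned prefix
--     for x in nodes:
--         if best is None or x > best:
--             # x is the first element >= q exactly for the still-pending q in (best, x]
--             while pending and pending[0] <= x:
--                 ans[pending[0]] = x
--                 pending = pending[1:]
--             best = x
--     first = nodes[0]
--     fingers = [ans.get(q, first) for q in queries]
--     # first-occurrence index of every value, built once (replaces repeated list.index scans)
--     idx = {}
--     for i, x in enumerate(nodes):
--         idx.setdefault(x, i)
--     visited = []
--     for n in fingers:
--         visited.append(n)
--         j = idx[n]
--         nxt = nodes[(j + 1) % L]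
--         if n < key <= nxt:
--             return nxt, visited
--         if nodes[(j - 1) % L] < key <= n:
--             return n, visited
--     below = [f for f in fingers if f < key]
--     return (max(below) if below else max(fingers)), visited
-- ===== Notes on version B (the rewrite author's own statement) =====
-- stated objective: alternative
-- what changed: B answers all 32 successor queries in one batch pass over nodes (sorted query list drained against a running maximum) instead of 32 separate scans, replaces the repeated list.index scans of next/prev by a first-index dict built once, and replaces the sort-then-scan fallback by max() over the fingers below (or all of) the key.
import Mathlib
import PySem

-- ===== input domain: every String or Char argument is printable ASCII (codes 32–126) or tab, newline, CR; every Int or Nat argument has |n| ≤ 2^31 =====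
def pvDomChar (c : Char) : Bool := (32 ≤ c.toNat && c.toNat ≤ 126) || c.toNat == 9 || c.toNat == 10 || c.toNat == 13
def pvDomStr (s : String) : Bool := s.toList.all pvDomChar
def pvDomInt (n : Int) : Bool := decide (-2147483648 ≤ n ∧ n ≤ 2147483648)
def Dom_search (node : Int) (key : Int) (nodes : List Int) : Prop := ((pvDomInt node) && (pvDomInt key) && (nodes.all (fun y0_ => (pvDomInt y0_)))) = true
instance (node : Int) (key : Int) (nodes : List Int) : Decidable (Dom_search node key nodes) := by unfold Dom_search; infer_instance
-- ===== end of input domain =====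

-- B replaces A's 32 separate successor scans by one batch pass over `nodes` (sorted query list
-- drained against a running maximum), A's repeated list.index scans by a first-index dict built
-- once, and A's sort-then-scan fallback by a max over the fingers below (or all of) the key;
-- objective: alternative (same asymptotic cost; A's early-exit scans can be faster on random data).

-- ===== PORT A =====

-- `for node in nodes: if node >= key: return node` (early-return scan)
def succLoopA (key : Int) : List Int → Option Int
  | [] => none
  | n :: rest => if n ≥ key then some n else succLoopA key rest

-- successor(key, nodes); nodes[0] on [] is an IndexError, excluded by Pre_search
def successorA (key : Int) (nodes : List Int) : Int :=
  match succLoopA (PySem.Int.mod key (2 ^ 32)) nodes with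
  | some n => n
  | none => (PySem.List.pyGet? nodes 0).getD 0

-- next(node, nodes); nodes.index raises ValueError when node ∉ nodes (never inside Pre_search)
def nextA (node : Int) (nodes : List Int) : Int :=
  (PySem.List.pyGet? nodes (PySem.Int.mod ((((PySem.List.index? nodes node).getD 0 : Nat) : Int) + 1) (PySem.List.len nodes))).getD 0

-- prev(node, nodes)
def prevA (node : Int) (nodes : List Int) : Int :=
  (PySem.List.pyGet? nodes (PySem.Int.mod ((((PySem.List.index? nodes node).getD 0 : Nat) : Int) - 1 + PySem.List.len nodes) (PySem.List.len nodes))).getD 0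

-- find_fingers(node, nodes): fingers.append(successor(node + 2**i, nodes)) for i in range(32)
def findFingersA (node : Int) (nodes : List Int) : List Int :=
  (PySem.List.pyRange 0 32 1).foldl (fun fingers i => fingers ++ [successorA (node + 2 ^ i.toNat) nodes]) []

-- the `for n in fingers` loop of search, with the visited accumulator
def searchLoopA (key : Int) (nodes : List Int) : List Int → List Int → Option Int × List Int
  | [], visited => (none, visited)
  | n :: rest, visited =>
    if n < key ∧ key ≤ nextA n nodes then (some (nextA n nodes), visited ++ [n])
    else if prevA n nodes < key ∧ key ≤ n then (some n, visited ++ [n])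
    else searchLoopA key nodes rest (visited ++ [n])

-- `idx = 0; while fingers[idx] < key: idx += 1`; none = the while ran past the end (IndexError, excluded by Pre_search)
def fbIdxA (key : Int) : List Int → Option Nat
  | [] => none
  | f :: rest => if f < key then (fbIdxA key rest).map (· + 1) else some 0

def search (node : Int) (key : Int) (nodes : List Int) : Int × List Int :=
  let fingers := findFingersA node nodes
  match searchLoopA key nodes fingers [] with
  | (some r, visited) => (r, visited)
  | (none, visited) =>
    let fs := PySem.List.sorted fingers id
    match fbIdxA key fs with
    | none => (0, visited)   -- Python raises IndexError here; outside Pre_search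
    | some idx =>
      ((PySem.List.pyGet? fs (PySem.Int.mod ((idx : Int) - 1 + PySem.List.len fs) (PySem.List.len fs))).getD 0, visited)

-- ===== PORT B =====

-- `best is None or x > best`
def bestLtB : Option Int → Int → Bool
  | none, _ => true
  | some b, x => decide (b < x)

-- `while pending and pending[0] <= x: ans[pending[0]] = x; pending = pending[1:]`
def drainB (x : Int) : List Int → PySem.Dict Int Int → List Int × PySem.Dict Int Int
  | [], ans => ([], ans)
  | q :: rest, ans => if q ≤ x then drainB x rest (ans.insert q x) else (q :: rest, ans)

-- `for x in nodes: if best is None or x > best: <drain>; best = x`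
def mergeB : List Int → List Int → Option Int → PySem.Dict Int Int → List Int × PySem.Dict Int Int
  | [], pending, _, ans => (pending, ans)
  | x :: rest, pending, best, ans =>
    if bestLtB best x then
      let pa := drainB x pending ans
      mergeB rest pa.1 (some x) pa.2
    else mergeB rest pending best ans

-- `for i, x in enumerate(nodes): idx.setdefault(x, i)`
def firstIdxB (nodes : List Int) : PySem.Dict Int Int :=
  (PySem.List.enumerate nodes).foldl (fun d p => d.setdefault p.2 p.1) PySem.Dict.empty

-- `for n in fingers: ...` main loop of Source B; idx[n] / nodes[...] are total here via getD (inside Pre_search every lookup hits)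
def loopB (key : Int) (nodes : List Int) (L : Int) (idxd : PySem.Dict Int Int) : List Int → List Int → Option Int × List Int
  | [], visited => (none, visited)
  | n :: rest, visited =>
    let j := idxd.getD n 0
    let nxt := (PySem.List.pyGet? nodes (PySem.Int.mod (j + 1) L)).getD 0
    if n < key ∧ key ≤ nxt then (some nxt, visited ++ [n])
    else if (PySem.List.pyGet? nodes (PySem.Int.mod (j - 1) L)).getD 0 < key ∧ key ≤ n then (some n, visited ++ [n])
    else loopB key nodes L idxd rest (visited ++ [n])

def search_alt (node : Int) (key : Int) (nodes : List Int) : Int × List Int :=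
  let queries := (PySem.List.pyRange 0 32 1).map (fun i => PySem.Int.mod (node + 2 ^ i.toNat) (2 ^ 32))
  let ans := (mergeB nodes (PySem.List.sorted (PySem.Set.ofList queries) id) none PySem.Dict.empty).2
  let fingers := queries.map (fun q => ans.getD q ((PySem.List.pyGet? nodes 0).getD 0))
  match loopB key nodes (PySem.List.len nodes) (firstIdxB nodes) fingers [] with
  | (some r, visited) => (r, visited)
  | (none, visited) =>
    let below := fingers.filter (fun f => decide (f < key))
    (if below.isEmpty then (PySem.List.max? fingers id).getD 0 else (PySem.List.max? below id).getD 0, visited)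

-- ===== PRECONDITION & SPEC =====

-- Closed-form restatements (library first-match / indexing only, no recursion of the ports)
-- of A's finger / neighbour values, used by Pre_search and Raises_search; they are proved
-- equal to the A-side helpers in the lemma section below.
def pvSucc (q : Int) (nodes : List Int) : Int :=
  (nodes.find? (fun x => decide (PySem.Int.mod q (2 ^ 32) ≤ x))).getD (nodes.headD 0)
def pvFingers (node : Int) (nodes : List Int) : List Int :=
  (List.range 32).map (fun i => pvSucc (node + 2 ^ i) nodes)
def pvNext (f : Int) (nodes : List Int) : Int :=
  nodes.getD (((nodes.idxOf? f).getD 0 + 1) % nodes.length) 0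
def pvPrev (f : Int) (nodes : List Int) : Int :=
  nodes.getD (((nodes.idxOf? f).getD 0 + nodes.length - 1) % nodes.length) 0

-- Pre_search = exactly the inputs where Python A returns: nodes nonempty (successor/nodes[0] would
-- raise IndexError on []) and, if no finger triggers an early return, some finger is ≥ key
-- (otherwise the final `while fingers[idx] < key` runs past the end: IndexError).
def Pre_search (node : Int) (key : Int) (nodes : List Int) : Prop :=
  nodes ≠ [] ∧
  ((∀ f ∈ pvFingers node nodes,
      ¬(f < key ∧ key ≤ pvNext f nodes) ∧ ¬(pvPrev f nodes < key ∧ key ≤ f)) →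
    ∃ f ∈ pvFingers node nodes, key ≤ f)
instance (node : Int) (key : Int) (nodes : List Int) : Decidable (Pre_search node key nodes) := by
  unfold Pre_search; infer_instance

def pvWitness_search : Int × Int × List Int := (0, 5, [3, 10])

def Spec_search (node : Int) (key : Int) (nodes : List Int) (out : Int × List Int) : Prop := out = search_alt node key nodes
instance (node : Int) (key : Int) (nodes : List Int) (out : Int × List Int) : Decidable (Spec_search node key nodes out) := by unfold Spec_search; infer_instance

-- ===== CLAIM (what is proved, stated in full; the proofs are below) =====
def Claim_equal_search : Prop := ∀ (node : Int) (key : Int) (nodes : List Int), Dom_search node key nodes → Pre_search node key nodes → Spec_search node key nodes (search node key nodes)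


-- ===== LEMMAS AND PROOFS =====

lemma findFingersA_eq_map (node : Int) (nodes : List Int) :
    findFingersA node nodes
      = (PySem.List.pyRange 0 32 1).map (fun i => successorA (node + 2 ^ i.toNat) nodes) := by
  unfold findFingersA
  rw [PySem.List.foldl_append_singleton_eq_map]
  simp

lemma succLoopA_mem {q n : Int} : ∀ {nodes : List Int}, succLoopA q nodes = some n → n ∈ nodes := by
  intro nodes h
  induction nodes with
  | nil => simp [succLoopA] at h
  | cons x rest ih =>
    by_cases hx : x ≥ q
    · simp [succLoopA, hx] at h; simp [h]
    · simp [succLoopA, hx] at h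
      exact List.mem_cons_of_mem _ (ih h)

lemma successorA_mem {q : Int} {nodes : List Int} (h : nodes ≠ []) : successorA q nodes ∈ nodes := by
  unfold successorA
  cases hs : succLoopA (PySem.Int.mod q (2 ^ 32)) nodes with
  | some n => exact succLoopA_mem hs
  | none =>
    cases nodes with
    | nil => exact absurd rfl h
    | cons x rest => simp

lemma mem_findFingersA {node : Int} {nodes : List Int} (h : nodes ≠ []) :
    ∀ f ∈ findFingersA node nodes, f ∈ nodes := by
  rw [findFingersA_eq_map]
  intro f hf
  obtain ⟨i, _, rfl⟩ := List.mem_map.mp hf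
  exact successorA_mem h

-- drain facts, all at once (sorted strictly ascending pending)
lemma drainB_spec (x : Int) : ∀ (p : List Int) (a : PySem.Dict Int Int), p.Pairwise (· < ·) →
    (∀ q ∈ (drainB x p a).1, q ∈ p ∧ x < q ∧ (drainB x p a).2.get? q = a.get? q) ∧
    (∀ q, q ∉ p → (drainB x p a).2.get? q = a.get? q) ∧
    (∀ q ∈ p, q ∉ (drainB x p a).1 → q ≤ x ∧ (drainB x p a).2.get? q = some x) ∧
    (drainB x p a).1.Pairwise (· < ·) := by
  intro p
  induction p with
  | nil =>
    intro a _
    refine ⟨by simp [drainB], by intro z _; rfl, by simp, by simp [drainB]⟩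
  | cons q rest ih =>
    intro a hp
    obtain ⟨hq, hrest⟩ := List.pairwise_cons.mp hp
    by_cases hqx : q ≤ x
    · have hd : drainB x (q :: rest) a = drainB x rest (a.insert q x) := by
        simp [drainB, hqx]
      obtain ⟨h1, h2, h3, h4⟩ := ih (a.insert q x) hrest
      rw [hd]
      refine ⟨?_, ?_, ?_, h4⟩
      · intro z hz
        obtain ⟨hz1, hz2, hz3⟩ := h1 z hz
        refine ⟨List.mem_cons_of_mem _ hz1, hz2, ?_⟩
        rw [hz3, PySem.Dict.get?_insert_of_ne _ _ (ne_of_gt (hq z hz1))]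
      · intro z hznot
        have hzq : z ≠ q := fun h => hznot (h ▸ List.mem_cons_self)
        have hzr : z ∉ rest := fun h => hznot (List.mem_cons_of_mem _ h)
        rw [h2 z hzr, PySem.Dict.get?_insert_of_ne _ _ hzq]
      · intro z hzmem hznot
        rcases List.mem_cons.mp hzmem with rfl | hzr
        · refine ⟨hqx, ?_⟩
          have hzr : z ∉ rest := fun h => absurd (hq z h) (lt_irrefl z)
          rw [h2 z hzr, PySem.Dict.get?_insert_self]
        · exact h3 z hzr hznot
    · have hd : drainB x (q :: rest) a = (q :: rest, a) := by
        simp [drainB, hqx]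
      rw [hd]
      refine ⟨?_, by intro z _; rfl, by intro z hzm hznot; exact absurd hzm hznot, hp⟩
      intro z hz
      refine ⟨hz, ?_, rfl⟩
      rcases List.mem_cons.mp hz with rfl | hzr
      · omega
      · have := hq z hzr; omega

lemma mergeB_preserve : ∀ (ns p : List Int) (b : Option Int) (a : PySem.Dict Int Int) (q : Int),
    p.Pairwise (· < ·) → q ∉ p → (mergeB ns p b a).2.get? q = a.get? q := by
  intro ns
  induction ns with
  | nil => intro p b a q _ _; rfl
  | cons x rest ih =>
    intro p b a q hp hq
    by_cases hb : bestLtB b x = true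
    · have hm : mergeB (x :: rest) p b a
          = mergeB rest (drainB x p a).1 (some x) (drainB x p a).2 := by
        simp [mergeB, hb]
      obtain ⟨h1, h2, _, h4⟩ := drainB_spec x p a hp
      rw [hm, ih _ _ _ _ h4 (fun hmem => hq (h1 q hmem).1)]
      exact h2 q hq
    · have hm : mergeB (x :: rest) p b a = mergeB rest p b a := by
        simp [mergeB, hb]
      rw [hm]
      exact ih _ _ _ _ hp hq

lemma mergeB_spec : ∀ (ns p : List Int) (b : Option Int) (a : PySem.Dict Int Int),
    p.Pairwise (· < ·) →
    (∀ q ∈ p, bestLtB b q = true) →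
    (∀ q ∈ p, a.get? q = none) →
    ∀ q ∈ p, (mergeB ns p b a).2.get? q = succLoopA q ns := by
  intro ns
  induction ns with
  | nil =>
    intro p b a _ _ ha q hq
    simpa [mergeB, succLoopA] using ha q hq
  | cons x rest ih =>
    intro p b a hp hb ha q hq
    by_cases hbx : bestLtB b x = true
    · have hm : mergeB (x :: rest) p b a
          = mergeB rest (drainB x p a).1 (some x) (drainB x p a).2 := by
        simp [mergeB, hbx]
      obtain ⟨h1, h2, h3, h4⟩ := drainB_spec x p a hp
      rw [hm]
      by_cases hq1 : q ∈ (drainB x p a).1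
      · obtain ⟨hqp, hxq, hget⟩ := h1 q hq1
        have hs : succLoopA q (x :: rest) = succLoopA q rest := by
          have : ¬ x ≥ q := by omega
          simp [succLoopA, this]
        rw [hs]
        refine ih _ (some x) _ h4 ?_ ?_ q hq1
        · intro z hz
          simpa [bestLtB] using (h1 z hz).2.1
        · intro z hz
          rw [(h1 z hz).2.2]
          exact ha z (h1 z hz).1
      · obtain ⟨hqx, hget⟩ := h3 q hq hq1
        rw [mergeB_preserve rest _ (some x) _ q h4 hq1, hget]
        have : x ≥ q := hqx
        simp [succLoopA, this]
    · have hm : mergeB (x :: rest) p b a = mergeB rest p b a := by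
        simp [mergeB, hbx]
      rw [hm]
      have hs : succLoopA q (x :: rest) = succLoopA q rest := by
        cases b with
        | none => simp [bestLtB] at hbx
        | some b0 =>
          have h1 : ¬ b0 < x := by simpa [bestLtB] using hbx
          have h2 : b0 < q := by simpa [bestLtB] using hb q hq
          have : ¬ x ≥ q := by omega
          simp [succLoopA, this]
      rw [hs]
      exact ih p b a hp hb ha q hq

-- B's batch pass computes exactly A's fingers
lemma fingers_eq (node : Int) (nodes : List Int) :
    ((PySem.List.pyRange 0 32 1).map (fun i => PySem.Int.mod (node + 2 ^ i.toNat) (2 ^ 32))).map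
        (fun q => ((mergeB nodes (PySem.List.sorted (PySem.Set.ofList ((PySem.List.pyRange 0 32 1).map (fun i => PySem.Int.mod (node + 2 ^ i.toNat) (2 ^ 32)))) id) none PySem.Dict.empty).2).getD q ((PySem.List.pyGet? nodes 0).getD 0))
      = findFingersA node nodes := by
  rw [findFingersA_eq_map, List.map_map]
  apply List.map_congr_left
  intro i hi
  have hperm := PySem.List.sorted_perm
    (PySem.Set.ofList ((PySem.List.pyRange 0 32 1).map (fun i => PySem.Int.mod (node + 2 ^ i.toNat) (2 ^ 32)))) (id : Int → Int) false
  have hnd : (PySem.List.sorted (PySem.Set.ofList ((PySem.List.pyRange 0 32 1).map (fun i => PySem.Int.mod (node + 2 ^ i.toNat) (2 ^ 32)))) id).Nodup :=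
    hperm.nodup_iff.mpr (PySem.Set.nodup_ofList _)
  have hpair_le := PySem.List.sorted_pairwise
    (PySem.Set.ofList ((PySem.List.pyRange 0 32 1).map (fun i => PySem.Int.mod (node + 2 ^ i.toNat) (2 ^ 32)))) (id : Int → Int)
  have hpair : (PySem.List.sorted (PySem.Set.ofList ((PySem.List.pyRange 0 32 1).map (fun i => PySem.Int.mod (node + 2 ^ i.toNat) (2 ^ 32)))) id).Pairwise (· < ·) :=
    (hpair_le.and hnd).imp (fun h => lt_of_le_of_ne h.1 h.2)
  have hqmem : PySem.Int.mod (node + 2 ^ i.toNat) (2 ^ 32)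
      ∈ PySem.List.sorted (PySem.Set.ofList ((PySem.List.pyRange 0 32 1).map (fun i => PySem.Int.mod (node + 2 ^ i.toNat) (2 ^ 32)))) id := by
    rw [hperm.mem_iff, PySem.Set.mem_ofList]
    exact List.mem_map_of_mem hi
  have hget := mergeB_spec nodes _ none PySem.Dict.empty hpair
    (by intro z _; rfl) (by intro z _; simp [PySem.Dict.get?_empty])
    (PySem.Int.mod (node + 2 ^ i.toNat) (2 ^ 32)) hqmem
  simp only [Function.comp_apply, PySem.Dict.getD_eq_get?_getD, hget]
  unfold successorA
  cases hs : succLoopA (PySem.Int.mod (node + 2 ^ i.toNat) (2 ^ 32)) nodes <;> rfl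

lemma firstIdxB_aux (x : Int) : ∀ (l : List Int) (s : Int) (d : PySem.Dict Int Int),
    ((PySem.List.enumerate l s).foldl (fun d p => d.setdefault p.2 p.1) d).get? x
      = (match d.get? x with
         | some v => some v
         | none => (PySem.List.index? l x).map (fun k => s + (k : Int))) := by
  intro l
  induction l with
  | nil =>
    intro s d
    simp only [PySem.List.enumerate_nil, List.foldl_nil]
    cases d.get? x <;> simp [PySem.List.index?_eq_idxOf?]
  | cons y l ih =>
    intro s d
    rw [PySem.List.enumerate_cons, List.foldl_cons, ih]
    by_cases hxy : x = y
    · subst hxy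
      rw [PySem.Dict.get?_setdefault_self, PySem.List.index?_cons_self]
      cases d.get? x <;> simp
    · rw [PySem.Dict.get?_setdefault_of_ne _ _ hxy,
        PySem.List.index?_cons_of_ne _ (fun h => hxy h.symm)]
      cases d.get? x
      · cases PySem.List.index? l x <;> simp
        ring
      · simp

lemma firstIdxB_getD {nodes : List Int} {x : Int} (hx : x ∈ nodes) :
    (firstIdxB nodes).getD x 0 = (((PySem.List.index? nodes x).getD 0 : Nat) : Int) := by
  have hsome : (PySem.List.index? nodes x).isSome := (PySem.List.index?_isSome_iff nodes x).mpr hx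
  obtain ⟨k, hk⟩ := Option.isSome_iff_exists.mp hsome
  unfold firstIdxB
  rw [PySem.Dict.getD_eq_get?_getD, firstIdxB_aux]
  rw [PySem.List.index?_eq_idxOf?] at hk
  simp [PySem.Dict.get?_empty, hk]

lemma loopB_eq (key : Int) (nodes : List Int) (hne : nodes ≠ []) :
    ∀ (fs visited : List Int), (∀ n ∈ fs, n ∈ nodes) →
    loopB key nodes (PySem.List.len nodes) (firstIdxB nodes) fs visited
      = searchLoopA key nodes fs visited := by
  intro fs
  induction fs with
  | nil => intro visited _; rfl
  | cons n rest ih =>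
    intro visited hmem
    have hn : n ∈ nodes := hmem n List.mem_cons_self
    have hL : (0:Int) < PySem.List.len nodes := by
      rw [PySem.List.len_eq]
      exact_mod_cast List.length_pos_of_ne_nil hne
    have hj := firstIdxB_getD hn
    have hprev : PySem.Int.mod ((((PySem.List.index? nodes n).getD 0 : Nat) : Int) - 1) (PySem.List.len nodes)
        = PySem.Int.mod ((((PySem.List.index? nodes n).getD 0 : Nat) : Int) - 1 + PySem.List.len nodes) (PySem.List.len nodes) := by
      rw [PySem.Int.mod_eq_emod_of_pos hL, PySem.Int.mod_eq_emod_of_pos hL, Int.add_emod_right]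
    simp only [loopB, searchLoopA, hj, hprev]
    rw [ih _ (fun m hm => hmem m (List.mem_cons_of_mem _ hm))]
    rfl

lemma searchLoopA_none (key : Int) (nodes : List Int) : ∀ (fs visited : List Int),
    (searchLoopA key nodes fs visited).1 = none →
    ∀ n ∈ fs, ¬(n < key ∧ key ≤ nextA n nodes) ∧ ¬(prevA n nodes < key ∧ key ≤ n) := by
  intro fs
  induction fs with
  | nil => intro visited _ n hn; cases hn
  | cons m rest ih =>
    intro visited h n hn
    by_cases h1 : m < key ∧ key ≤ nextA m nodes
    · rw [searchLoopA, if_pos h1] at h; cases h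
    · by_cases h2 : prevA m nodes < key ∧ key ≤ m
      · rw [searchLoopA, if_neg h1, if_pos h2] at h; cases h
      · rw [searchLoopA, if_neg h1, if_neg h2] at h
        rcases List.mem_cons.mp hn with rfl | hr
        · exact ⟨h1, h2⟩
        · exact ih _ h n hr

lemma fbIdxA_eq (key : Int) : ∀ fs : List Int, (∃ f ∈ fs, ¬ f < key) →
    fbIdxA key fs = some (fs.takeWhile (fun f => decide (f < key))).length := by
  intro fs
  induction fs with
  | nil => rintro ⟨f, hf, -⟩; cases hf
  | cons f rest ih =>
    rintro ⟨g, hg, hgk⟩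
    by_cases hf : f < key
    · have hgr : g ∈ rest := by
        rcases List.mem_cons.mp hg with rfl | hr
        · exact absurd hf hgk
        · exact hr
      rw [fbIdxA, if_pos hf, ih ⟨g, hgr, hgk⟩]
      simp [hf]
    · rw [fbIdxA, if_neg hf]
      simp [hf]

lemma filter_eq_takeWhile_of_sorted (key : Int) : ∀ fs : List Int, fs.Pairwise (· ≤ ·) →
    fs.filter (fun f => decide (f < key)) = fs.takeWhile (fun f => decide (f < key)) := by
  intro fs
  induction fs with
  | nil => intro _; rfl
  | cons f rest ih =>
    intro hp
    obtain ⟨hf, hrest⟩ := List.pairwise_cons.mp hp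
    by_cases h : f < key
    · simp [h, ih hrest]
    · have hrest0 : rest.filter (fun g => decide (g < key)) = [] := by
        rw [List.filter_eq_nil_iff]
        intro g hg hdec
        rw [decide_eq_true_eq] at hdec
        exact h (lt_of_le_of_lt (hf g hg) hdec)
      have hd : (decide (f < key)) = false := decide_eq_false h
      rw [List.filter_cons, List.takeWhile_cons, hd]
      simp [hrest0]

lemma le_getLast_of_pairwise : ∀ {m : List Int} (hne : m ≠ []), m.Pairwise (· ≤ ·) →
    ∀ y ∈ m, y ≤ m.getLast hne := by
  intro m
  induction m with
  | nil => intro h; exact absurd rfl h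
  | cons a rest ih =>
    intro _ hp y hy
    obtain ⟨ha, hrest⟩ := List.pairwise_cons.mp hp
    cases rest with
    | nil =>
      simp at hy
      simp [hy]
    | cons b t =>
      have hrne : b :: t ≠ [] := by simp
      rw [List.getLast_cons hrne]
      rcases List.mem_cons.mp hy with rfl | hr
      · exact ha _ (List.getLast_mem hrne)
      · exact ih hrne hrest y hr

lemma max?_getD_eq_getLast {l m : List Int} (hp : l.Perm m) (hs : m.Pairwise (· ≤ ·)) (hne : m ≠ []) :
    (PySem.List.max? l id).getD 0 = m.getLast hne := by
  have hlne : l ≠ [] := fun h => hne (List.Perm.eq_nil (h ▸ hp.symm))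
  cases hm : PySem.List.max? l id with
  | none => exact absurd ((PySem.List.max?_eq_none_iff l id).mp hm) hlne
  | some mx =>
    have h1 := PySem.List.max?_isMax hm
    have h2 := PySem.List.max?_mem hm
    simp only [Option.getD_some]
    exact le_antisymm
      (le_getLast_of_pairwise hne hs mx (hp.mem_iff.mp h2))
      (h1 _ (hp.mem_iff.mpr (List.getLast_mem hne)))

-- ===== VERDICT (by name: the statement is the Claim_ definition above) =====
lemma find?_eq_succLoopA (k : Int) : ∀ nodes : List Int,
    nodes.find? (fun x => decide (k ≤ x)) = succLoopA k nodes := by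
  intro nodes
  induction nodes with
  | nil => rfl
  | cons x rest ih =>
    by_cases hx : k ≤ x
    · rw [succLoopA, if_pos (show x ≥ k from hx)]
      simp [hx]
    · rw [succLoopA, if_neg (show ¬ x ≥ k from hx), ← ih]
      simp [hx]

lemma pvSucc_eq (q : Int) (nodes : List Int) : pvSucc q nodes = successorA q nodes := by
  unfold pvSucc successorA
  rw [find?_eq_succLoopA]
  cases hs : succLoopA (PySem.Int.mod q (2 ^ 32)) nodes
  · cases nodes with
    | nil => rfl
    | cons x t => simp
  · rfl

lemma pvFingers_eq (node : Int) (nodes : List Int) :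
    pvFingers node nodes = findFingersA node nodes := by
  rw [findFingersA_eq_map, PySem.List.pyRange_one, List.map_map]
  unfold pvFingers
  apply List.map_congr_left
  intro i _
  rw [pvSucc_eq]
  norm_num

lemma pvNext_eq {nodes : List Int} (hne : nodes ≠ []) (f : Int) :
    pvNext f nodes = nextA f nodes := by
  unfold pvNext nextA
  have hL : 0 < nodes.length := List.length_pos_of_ne_nil hne
  rw [PySem.List.index?_eq_idxOf?, PySem.List.len_eq,
    PySem.Int.mod_eq_emod_of_pos (by exact_mod_cast hL)]
  have hcast : ((((nodes.idxOf? f).getD 0 : Nat) : Int) + 1) % (nodes.length : Int)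
      = ((((nodes.idxOf? f).getD 0 + 1) % nodes.length : Nat) : Int) := by
    push_cast
    rfl
  rw [hcast, PySem.List.pyGet?_natCast, List.getD_eq_getElem?_getD]

lemma pvPrev_eq {nodes : List Int} (hne : nodes ≠ []) (f : Int) :
    pvPrev f nodes = prevA f nodes := by
  unfold pvPrev prevA
  have hL : 0 < nodes.length := List.length_pos_of_ne_nil hne
  rw [PySem.List.index?_eq_idxOf?, PySem.List.len_eq,
    PySem.Int.mod_eq_emod_of_pos (by exact_mod_cast hL)]
  have hcast : ((((nodes.idxOf? f).getD 0 : Nat) : Int) - 1 + (nodes.length : Int))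
      = ((((nodes.idxOf? f).getD 0 + nodes.length - 1) : Nat) : Int) := by
    rw [Nat.cast_sub (by omega)]
    push_cast
    omega
  rw [hcast, ← Int.natCast_mod, PySem.List.pyGet?_natCast, List.getD_eq_getElem?_getD]

lemma length_findFingersA (node : Int) (nodes : List Int) :
    (findFingersA node nodes).length = 32 := by
  rw [findFingersA_eq_map]
  simp [PySem.List.length_pyRange_one]

set_option maxHeartbeats 1000000 in
theorem search_spec : Claim_equal_search := by
  intro node key nodes _ hpre
  obtain ⟨hne, hvalid⟩ := hpre
  unfold Spec_search
  simp only [search, search_alt]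
  rw [fingers_eq]
  rw [loopB_eq key nodes hne _ [] (mem_findFingersA hne)]
  cases hsl : searchLoopA key nodes (findFingersA node nodes) [] with
  | mk o visited =>
    cases o with
    | some r => rfl
    | none =>
      simp only []
      -- the early-return loop found nothing: A's fallback vs B's max formulas
      have hnoearly := searchLoopA_none key nodes (findFingersA node nodes) [] (by rw [hsl])
      have hfe := pvFingers_eq node nodes
      have hnoearly' : ∀ f ∈ pvFingers node nodes,
          ¬(f < key ∧ key ≤ pvNext f nodes) ∧ ¬(pvPrev f nodes < key ∧ key ≤ f) := by
        intro f hf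
        rw [hfe] at hf
        rw [pvNext_eq hne, pvPrev_eq hne]
        exact hnoearly f hf
      obtain ⟨g, hg, hkg⟩ := hvalid hnoearly'
      rw [hfe] at hg
      have hperm : (PySem.List.sorted (findFingersA node nodes) id).Perm (findFingersA node nodes) :=
        PySem.List.sorted_perm _ _ _
      have hpair : (PySem.List.sorted (findFingersA node nodes) id).Pairwise (· ≤ ·) :=
        PySem.List.sorted_pairwise _ _
      have hlen : (PySem.List.sorted (findFingersA node nodes) id).length = 32 := by
        rw [hperm.length_eq, length_findFingersA]
      have hex : ∃ f ∈ PySem.List.sorted (findFingersA node nodes) id, ¬ f < key :=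
        ⟨g, hperm.mem_iff.mpr hg, not_lt.mpr hkg⟩
      rw [fbIdxA_eq key _ hex]
      have hfil : (findFingersA node nodes).filter (fun f => decide (f < key))
          |>.Perm ((PySem.List.sorted (findFingersA node nodes) id).takeWhile (fun f => decide (f < key))) := by
        rw [← filter_eq_takeWhile_of_sorted key _ hpair]
        exact (hperm.symm).filter _
      have htw_le : ((PySem.List.sorted (findFingersA node nodes) id).takeWhile (fun f => decide (f < key))).length
          ≤ 32 := hlen ▸ (List.takeWhile_sublist _).length_le
      have htw_lt : ((PySem.List.sorted (findFingersA node nodes) id).takeWhile (fun f => decide (f < key))).length < 32 := by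
        rcases lt_or_eq_of_le htw_le with h | h
        · exact h
        · exfalso
          have : (PySem.List.sorted (findFingersA node nodes) id).takeWhile (fun f => decide (f < key))
              = PySem.List.sorted (findFingersA node nodes) id := by
            apply List.IsPrefix.eq_of_length (List.takeWhile_prefix _)
            rw [h, hlen]
          have hg' := List.mem_takeWhile_imp (l := PySem.List.sorted (findFingersA node nodes) id)
            (p := fun f => decide (f < key)) (x := g) (by rw [this]; exact hperm.mem_iff.mpr hg)
          rw [decide_eq_true_eq] at hg'
          omega
      set fs := PySem.List.sorted (findFingersA node nodes) id with hfs
      set t := fs.takeWhile (fun f => decide (f < key)) with ht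
      have hfsne : fs ≠ [] := by
        intro h; rw [h] at hlen; simp at hlen
      by_cases hidx : t.length = 0
      · -- no finger below key: A wraps to the last (largest) sorted finger, B takes max(fingers)
        have hbelow : (findFingersA node nodes).filter (fun f => decide (f < key)) = [] := by
          have ht0 : t = [] := List.eq_nil_of_length_eq_zero hidx
          exact (ht0 ▸ hfil).eq_nil
        rw [hbelow]
        simp only [List.isEmpty_nil, if_true, hidx]
        have hmod : PySem.Int.mod (((0 : Nat) : Int) - 1 + PySem.List.len fs) (PySem.List.len fs) = (31 : Int) := by
          rw [PySem.List.len_eq, hlen]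
          rw [PySem.Int.mod_eq_emod_of_pos (by omega)]
          decide
        rw [hmod]
        have hget : (PySem.List.pyGet? fs (31 : Int)).getD 0 = fs.getLast hfsne := by
          have h31 : (31 : Int) = ((31 : Nat) : Int) := rfl
          rw [h31, PySem.List.pyGet?_natCast]
          rw [List.getLast_eq_getElem]
          rw [List.getElem?_eq_getElem (by omega)]
          simp [hlen]
        rw [hget]
        rw [max?_getD_eq_getLast hperm.symm hpair hfsne]
      · -- some finger below key: A lands on the largest sorted finger < key, B takes max(below)
        have htne : t ≠ [] := fun h => hidx (by rw [h]; rfl)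
        have hbelowne : (findFingersA node nodes).filter (fun f => decide (f < key)) ≠ [] := by
          intro h
          exact htne (by have := hfil; rw [h] at this; exact (this.symm).eq_nil)
        rw [if_neg (by simpa [List.isEmpty_iff] using hbelowne)]
        dsimp only
        have hmod : PySem.Int.mod ((t.length : Int) - 1 + PySem.List.len fs) (PySem.List.len fs)
            = (t.length : Int) - 1 := by
          rw [PySem.List.len_eq, PySem.Int.mod_eq_emod_of_pos (by rw [hlen]; omega), Int.add_emod_right]
          rw [Int.emod_eq_of_lt (by omega) (by rw [hlen]; push_cast; omega)]
        rw [hmod]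
        have hpre : t <+: fs := List.takeWhile_prefix _
        have hget : (PySem.List.pyGet? fs ((t.length : Int) - 1)).getD 0 = t.getLast htne := by
          have hcast : (t.length : Int) - 1 = ((t.length - 1 : Nat) : Int) := by
            have : 1 ≤ t.length := by omega
            push_cast [this]
            omega
          rw [hcast, PySem.List.pyGet?_natCast]
          rw [List.getLast_eq_getElem]
          have hlt : t.length - 1 < fs.length := by
            have h1 : t.length ≤ fs.length := (List.takeWhile_sublist _).length_le
            omega
          rw [List.getElem?_eq_getElem hlt, Option.getD_some]
          exact (List.IsPrefix.getElem hpre (by omega)).symm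
        rw [hget]
        rw [max?_getD_eq_getLast hfil (hpair.sublist (List.takeWhile_sublist _)) htne]
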